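-- pv_equiv track=rewrite | github.com/richfrem/Project_Sanctuary | gardener/environment.py | _extract_recent_entries
-- ===== SOURCE A (Python) =====
-- from typing import Dict, List, Tuple, Optional, Any
--
-- def _extract_recent_entries(chronicle_content: str, num_entries: int = 3) -> List[str]:
--     """Extract the most recent chronicle entries for context"""
--     entries = []
--     lines = chronicle_content.split('\n')
--     current_entry = []
--
--     for line in lines:
--         if line.startswith('### **Entry'):
--             if current_entry and len(entries) < num_entries:
--                 entries.append('\n'.join(current_entry))
--             current_entry = [line]
--         elif current_entry:
--             current_entry.append(line)
--
--     # Add the last entry if we haven't reached the limit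
--     if current_entry and len(entries) < num_entries:
--         entries.append('\n'.join(current_entry))
--
--     return entries[-num_entries:]  # Return most recent entries
-- ===== SOURCE B (Python) =====
-- def _extract_recent_entries(chronicle_content: str, num_entries: int = 3):
--     """Extract the most recent chronicle entries for context"""
--     if num_entries <= 0:
--         return []
--     MARKER = '### **Entry'
--
--     def span_body(lines):
--         # (longest prefix of non-marker lines, remainder starting at the next marker)
--         for i, l in enumerate(lines):
--             if l.startswith(MARKER):
--                 return lines[:i], lines[i:]
--         return lines, []
--
--     _, rest = span_body(chronicle_content.split('\n'))
--     blocks = []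
--     while rest and len(blocks) < num_entries:
--         head, tail = rest[0], rest[1:]
--         body, rest = span_body(tail)
--         blocks.append('\n'.join([head] + body))
--     return blocks
-- ===== Notes on version B (the rewrite author's own statement) =====
-- stated objective: alternative
-- what changed: A threads an (entries, current_entry) accumulator through every line and slices at the end; B first skips the preamble up to the first entry-marker line, then repeatedly splits off one marker-headed span per block (span_body = non-marker prefix + remainder), stopping early once num_entries blocks are built, with an explicit non-positive guard instead of the tail slice.
import Mathlib
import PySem

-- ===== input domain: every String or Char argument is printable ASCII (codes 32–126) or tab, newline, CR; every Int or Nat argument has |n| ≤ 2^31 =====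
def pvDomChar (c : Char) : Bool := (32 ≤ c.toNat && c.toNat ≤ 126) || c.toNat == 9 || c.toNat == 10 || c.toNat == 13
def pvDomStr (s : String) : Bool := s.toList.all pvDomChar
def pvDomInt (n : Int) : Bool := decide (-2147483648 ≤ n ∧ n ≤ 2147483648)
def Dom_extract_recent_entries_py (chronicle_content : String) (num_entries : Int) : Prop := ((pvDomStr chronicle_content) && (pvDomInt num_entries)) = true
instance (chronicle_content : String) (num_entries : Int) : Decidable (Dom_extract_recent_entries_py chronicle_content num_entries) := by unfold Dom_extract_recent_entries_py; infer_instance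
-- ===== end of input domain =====

-- B replaces A's single accumulator loop by marker-span grouping with early exit; objective: alternative decomposition (equal return value proved).


-- ===== PORT A =====
-- one step of A's `for line in lines` loop; state = (entries, current_entry)
def pvStepA (n : Int) (s : List String × List String) (line : String) : List String × List String :=
  if PySem.Str.startswith line "### **Entry" then
    if s.2 ≠ [] ∧ (s.1.length : Int) < n then (s.1 ++ [PySem.Str.join "\n" s.2], [line])
    else (s.1, [line])
  else if s.2 ≠ [] then (s.1, s.2 ++ [line])
  else s

def extract_recent_entries_py (chronicle_content : String) (num_entries : Int) : List String :=
  -- split('\n'): the separator is a non-empty literal, so Python never raises (getD is unreachable)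
  let lines := (PySem.Str.split? chronicle_content "\n").getD []
  let s := lines.foldl (pvStepA num_entries) ([], [])
  let entries := if s.2 ≠ [] ∧ (s.1.length : Int) < num_entries
                 then s.1 ++ [PySem.Str.join "\n" s.2] else s.1
  PySem.List.slice entries (some (-num_entries)) none   -- entries[-num_entries:]

-- ===== PORT B =====
def pvNotMarker (l : String) : Bool := !(PySem.Str.startswith l "### **Entry")

-- B's `while rest and len(blocks) < num_entries` loop: rest starts at a marker;
-- span_body's two components are the takeWhile/dropWhile of pvNotMarker.
def pvBlocks : Nat → List String → List String
  | 0, _ => []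
  | _ + 1, [] => []
  | k + 1, head :: tail =>
      PySem.Str.join "\n" (head :: tail.takeWhile pvNotMarker)
        :: pvBlocks k (tail.dropWhile pvNotMarker)

def extract_recent_entries_py_alt (chronicle_content : String) (num_entries : Int) : List String :=
  if num_entries ≤ 0 then []
  else pvBlocks num_entries.toNat
        (((PySem.Str.split? chronicle_content "\n").getD []).dropWhile pvNotMarker)

-- ===== PRECONDITION & SPEC =====
def Spec_extract_recent_entries_py (chronicle_content : String) (num_entries : Int) (out : List String) : Prop := out = extract_recent_entries_py_alt chronicle_content num_entries
instance (chronicle_content : String) (num_entries : Int) (out : List String) : Decidable (Spec_extract_recent_entries_py chronicle_content num_entries out) := by unfold Spec_extract_recent_entries_py; infer_instance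

-- ===== CLAIM (what is proved, stated in full; the proofs are below) =====
def Claim_equal_extract_recent_entries_py : Prop := ∀ (chronicle_content : String) (num_entries : Int), Dom_extract_recent_entries_py chronicle_content num_entries → Spec_extract_recent_entries_py chronicle_content num_entries (extract_recent_entries_py chronicle_content num_entries)

-- ===== LEMMAS AND PROOFS =====
theorem pvBlocks_nil (k : Nat) : pvBlocks k [] = [] := by cases k <;> rfl

theorem pvBlocks_length (k : Nat) : ∀ xs : List String, (pvBlocks k xs).length ≤ k := by
  induction k with
  | zero => intro xs; simp [pvBlocks]
  | succ k ih =>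
    intro xs
    cases xs with
    | nil => simp [pvBlocks]
    | cons h t => simpa [pvBlocks] using ih _

-- evaluation of one step of A's loop, by branch
theorem pvStepA_m_app {n : Int} {ents cur : List String} {l : String}
    (hm : PySem.Str.startswith l "### **Entry" = true)
    (hc : cur ≠ []) (hl : (ents.length : Int) < n) :
    pvStepA n (ents, cur) l = (ents ++ [PySem.Str.join "\n" cur], [l]) := by
  unfold pvStepA; rw [hm]; simp [hc, hl]

theorem pvStepA_m_noapp {n : Int} {ents cur : List String} {l : String}
    (hm : PySem.Str.startswith l "### **Entry" = true)
    (h : ¬ (cur ≠ [] ∧ (ents.length : Int) < n)) :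
    pvStepA n (ents, cur) l = (ents, [l]) := by
  unfold pvStepA; rw [hm]; simp only [if_true]; rw [if_neg h]

theorem pvStepA_nm {n : Int} {ents cur : List String} {l : String}
    (hm : PySem.Str.startswith l "### **Entry" = false)
    (hc : cur ≠ []) :
    pvStepA n (ents, cur) l = (ents, cur ++ [l]) := by
  unfold pvStepA; rw [hm]; simp [hc]

theorem pvStepA_nm_empty {n : Int} {ents : List String} {l : String}
    (hm : PySem.Str.startswith l "### **Entry" = false) :
    pvStepA n (ents, []) l = (ents, []) := by
  unfold pvStepA; rw [hm]; simp

-- A's post-loop finish: append the dangling current entry if the limit allows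
def pvFinishA (n : Int) (s : List String × List String) : List String :=
  if s.2 ≠ [] ∧ (s.1.length : Int) < n then s.1 ++ [PySem.Str.join "\n" s.2] else s.1

theorem pvFinishA_fst {n : Int} (p : List String × List String)
    (h : ¬ ((p.1.length : Int) < n)) : pvFinishA n p = p.1 := by
  unfold pvFinishA; rw [if_neg]; tauto

-- A's port is the loop followed by the finish and the tail slice (definitional)
theorem pvPortA_eq (c : String) (n : Int) :
    extract_recent_entries_py c n
      = PySem.List.slice
          (pvFinishA n (List.foldl (pvStepA n) ([], [])
            ((PySem.Str.split? c "\n").getD [])))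
          (some (-n)) none := rfl

-- once `entries` is full, A's loop never touches it again
theorem pvSat (n : Int) : ∀ (rest ents cur : List String), ¬ ((ents.length : Int) < n) →
    (List.foldl (pvStepA n) (ents, cur) rest).1 = ents := by
  intro rest
  induction rest with
  | nil => intro ents cur _; rfl
  | cons l t ih =>
    intro ents cur h
    rw [List.foldl_cons]
    by_cases hm : PySem.Str.startswith l "### **Entry" = true
    · rw [pvStepA_m_noapp hm (by tauto)]; exact ih ents [l] h
    · have hm' : PySem.Str.startswith l "### **Entry" = false := by
        simpa using hm
      by_cases hc : cur = []
      · subst hc; rw [pvStepA_nm_empty hm']; exact ih ents [] h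
      · rw [pvStepA_nm hm' hc]; exact ih ents (cur ++ [l]) h

-- main invariant: while a current entry is open and the limit not reached,
-- A finishes exactly as B's span grouping does
theorem pvMain (n : Int) : ∀ (rest ents cur : List String), cur ≠ [] → (ents.length : Int) < n →
    pvFinishA n (List.foldl (pvStepA n) (ents, cur) rest)
      = ents ++ PySem.Str.join "\n" (cur ++ rest.takeWhile pvNotMarker)
          :: pvBlocks (n - ents.length - 1).toNat (rest.dropWhile pvNotMarker) := by
  intro rest
  induction rest with
  | nil =>
    intro ents cur hc hl
    simp [pvFinishA, hc, hl, pvBlocks_nil]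
  | cons l t ih =>
    intro ents cur hc hl
    rw [List.foldl_cons]
    by_cases hm : PySem.Str.startswith l "### **Entry" = true
    · have hnm : pvNotMarker l = false := by unfold pvNotMarker; rw [hm]; rfl
      rw [pvStepA_m_app hm hc hl]
      rw [List.takeWhile_cons_of_neg (by simp [hnm]), List.dropWhile_cons_of_neg (by simp [hnm])]
      by_cases h2 : ((ents.length : Int) + 1 < n)
      · rw [ih (ents ++ [PySem.Str.join "\n" cur]) [l] (by simp) (by simp; omega)]
        have hk : (n - (((ents ++ [PySem.Str.join "\n" cur]).length : Nat) : Int) - 1).toNat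
            = (n - (ents.length : Int) - 2).toNat := by simp; omega
        have hk2 : (n - (ents.length : Int) - 1).toNat
            = (n - (ents.length : Int) - 2).toNat + 1 := by omega
        rw [hk, hk2, pvBlocks]
        simp
      · set p := List.foldl (pvStepA n) (ents ++ [PySem.Str.join "\n" cur], [l]) t with hp
        have hfst : p.1 = ents ++ [PySem.Str.join "\n" cur] :=
          pvSat n t _ [l] (by simp; omega)
        rw [pvFinishA_fst p (by rw [hfst]; simp; omega), hfst]
        have hz : (n - (ents.length : Int) - 1).toNat = 0 := by omega
        rw [hz, pvBlocks]
        simp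
    · have hm' : PySem.Str.startswith l "### **Entry" = false := by simpa using hm
      have hnm : pvNotMarker l = true := by unfold pvNotMarker; rw [hm']; rfl
      rw [pvStepA_nm hm' hc]
      rw [ih ents (cur ++ [l]) (by simp) hl]
      rw [List.takeWhile_cons_of_pos (by simp [hnm]), List.dropWhile_cons_of_pos (by simp [hnm])]
      simp

-- the preamble before the first marker leaves A's empty state unchanged,
-- and from the first marker on A produces exactly B's blocks
theorem pvTop (n : Int) (hn : 0 < n) : ∀ lines : List String,
    pvFinishA n (List.foldl (pvStepA n) ([], []) lines)
      = pvBlocks n.toNat (lines.dropWhile pvNotMarker) := by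
  intro lines
  induction lines with
  | nil => simp [pvFinishA, pvBlocks_nil]
  | cons l t ih =>
    rw [List.foldl_cons]
    by_cases hm : PySem.Str.startswith l "### **Entry" = true
    · have hnm : pvNotMarker l = false := by unfold pvNotMarker; rw [hm]; rfl
      rw [pvStepA_m_noapp hm (by simp)]
      rw [pvMain n t [] [l] (by simp) (by simpa using hn)]
      rw [List.dropWhile_cons_of_neg (by simp [hnm])]
      have hk : n.toNat = (n - 1).toNat + 1 := by omega
      rw [hk, pvBlocks]
      simp
    · have hm' : PySem.Str.startswith l "### **Entry" = false := by simpa using hm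
      have hnm : pvNotMarker l = true := by unfold pvNotMarker; rw [hm']; rfl
      rw [pvStepA_nm_empty hm', ih, List.dropWhile_cons_of_pos (by simp [hnm])]

-- ===== VERDICT (by name: the statement is the Claim_ definition above) =====
theorem extract_recent_entries_py_spec : Claim_equal_extract_recent_entries_py := by
  intro c n _
  unfold Spec_extract_recent_entries_py extract_recent_entries_py_alt
  rw [pvPortA_eq]
  by_cases hn : n ≤ 0
  · rw [if_pos hn]
    set p := List.foldl (pvStepA n) ([], []) ((PySem.Str.split? c "\n").getD []) with hp
    have hfst : p.1 = [] := pvSat n _ [] [] (by simp; omega)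
    rw [pvFinishA_fst p (by rw [hfst]; simp; omega), hfst]
    simp [PySem.List.slice_some_none]
  · rw [if_neg hn]
    rw [pvTop n (by omega)]
    set es := pvBlocks n.toNat
      (((PySem.Str.split? c "\n").getD []).dropWhile pvNotMarker) with hes
    have hlen : es.length ≤ n.toNat := pvBlocks_length _ _
    have hneg : -n = -((n.toNat : Nat) : Int) := by omega
    rw [hneg, PySem.List.slice_from_neg_natCast _ _ (by omega)]
    have hz : es.length - n.toNat = 0 := by omega
    rw [hz, List.drop_zero]
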